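-- pv_equiv track=rewrite | github.com/cli2/data-manipulation | Data_Plotting/data.py | find_region_split
-- ===== SOURCE A (Python) =====
-- def find_region_split(l):
--     n = 0
--     spliters=[]
--     while n<len(l)-1:
--         if l[n+1][-1]==l[n][-1]:
--             n+=1
--         else:
--             n+=1
--             spliters.append(n)
--     return spliters
-- ===== SOURCE B (Python) =====
-- def _run_lengths(keys):
--     # lengths of maximal runs of equal keys, in order
--     if not keys:
--         return []
--     k, rest, i = keys[0], keys[1:], 1
--     while rest and rest[0] == k:
--         i += 1
--         rest = rest[1:]
--     return [i] + _run_lengths(rest)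
--
-- def find_region_split(l):
--     if len(l) < 2:
--         return []
--     keys = [x[-1] for x in l]
--     counts = _run_lengths(keys)
--     out = []
--     total = 0
--     for c in counts[:-1]:
--         total += c
--         out.append(total)
--     return out
-- ===== Notes on version B (the rewrite author's own statement) =====
-- stated objective: alternative
-- what changed: B run-length-encodes the sequence of last items and emits boundary indices as prefix sums of the run lengths (except the last run), instead of A's index-based scan over every adjacent pair appending the index on mismatch.
import Mathlib
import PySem

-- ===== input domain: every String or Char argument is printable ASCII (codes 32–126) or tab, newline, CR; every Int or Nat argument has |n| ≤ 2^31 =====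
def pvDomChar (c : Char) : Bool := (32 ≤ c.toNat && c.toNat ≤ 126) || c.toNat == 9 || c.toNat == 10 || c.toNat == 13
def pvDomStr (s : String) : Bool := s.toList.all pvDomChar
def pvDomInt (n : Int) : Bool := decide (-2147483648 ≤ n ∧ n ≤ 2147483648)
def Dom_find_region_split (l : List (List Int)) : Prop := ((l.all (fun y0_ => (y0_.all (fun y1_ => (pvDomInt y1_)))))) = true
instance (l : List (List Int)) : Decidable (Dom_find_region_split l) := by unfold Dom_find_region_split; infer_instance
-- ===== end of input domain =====

-- B replaces A's adjacent-pair index scan by run-length encoding of the last items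
-- plus prefix sums of the run lengths (objective: alternative decomposition).

-- ===== PORT A =====
-- x[-1] as A uses it; Pre_ guarantees the access succeeds where the loop runs
def lastD (x : List Int) : Int := (PySem.List.pyGet? x (-1)).getD 0

-- A's while loop: state (n, spliters), fuel = l.length bounds the iteration count
def goA (l : List (List Int)) : Nat → Nat → List Int → List Int
  | 0, _, spl => spl
  | fuel+1, n, spl =>
    if n < l.length - 1 then
      if lastD (l.getD (n+1) []) == lastD (l.getD n []) then
        goA l fuel (n+1) spl
      else
        goA l fuel (n+1) (spl ++ [((n : Int) + 1)])
    else spl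

def find_region_split (l : List (List Int)) : List Int :=
  goA l l.length 0 []

-- ===== PORT B =====
-- inner while of _run_lengths: consume the leading run of k, counting from i
def rlGo (k : Int) : List Int → Nat → Nat × List Int
  | r :: rs, i => if r == k then rlGo k rs (i+1) else (i, r :: rs)
  | [], i => (i, [])

theorem rlGo_len_le (k : Int) : ∀ (rest : List Int) (i : Nat), (rlGo k rest i).2.length ≤ rest.length := by
  intro rest
  induction rest with
  | nil => intro i; simp [rlGo]
  | cons r rs ih =>
      intro i
      by_cases h : (r == k) = true
      · simpa [rlGo, h] using Nat.le_succ_of_le (ih (i+1))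
      · simp [rlGo, h]

-- _run_lengths: lengths of maximal runs of equal keys
def runLengths : List Int → List Nat
  | [] => []
  | k :: tl => (rlGo k tl 1).1 :: runLengths (rlGo k tl 1).2
termination_by keys => keys.length
decreasing_by
  exact Nat.lt_succ_of_le (rlGo_len_le k tl 1)

-- the for loop over counts[:-1] accumulating total
def sumsB : List Nat → Int → List Int
  | [], _ => []
  | c :: cs, total => (total + (c : Int)) :: sumsB cs (total + (c : Int))

def find_region_split_alt (l : List (List Int)) : List Int :=
  if l.length < 2 then []
  else
    let keys := l.map lastD
    sumsB (runLengths keys).dropLast 0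

-- ===== PRECONDITION & SPEC =====
-- Pre_ excludes exactly the inputs on which A raises IndexError: when the loop
-- runs (length ≥ 2), every element is indexed with [-1], so all must be nonempty.
def Pre_find_region_split (l : List (List Int)) : Prop := 1 < l.length → ∀ x ∈ l, x ≠ []
instance (l : List (List Int)) : Decidable (Pre_find_region_split l) := by unfold Pre_find_region_split; infer_instance

def pvWitness_find_region_split : List (List Int) := [[1], [1, 2], [3]]

def Spec_find_region_split (l : List (List Int)) (out : List Int) : Prop := out = find_region_split_alt l
instance (l : List (List Int)) (out : List Int) : Decidable (Spec_find_region_split l out) := by unfold Spec_find_region_split; infer_instance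

-- ===== CLAIM (what is proved, stated in full; the proofs are below) =====
def Claim_equal_find_region_split : Prop := ∀ (l : List (List Int)), Dom_find_region_split l → Pre_find_region_split l → Spec_find_region_split l (find_region_split l)

-- ===== LEMMAS AND PROOFS =====

-- reference: pairwise walk over the key list (prev key, remaining keys, next index)
def pw : Int → List Int → Int → List Int
  | _, [], _ => []
  | p, k :: ks, idx => if k == p then pw k ks (idx + 1) else idx :: pw k ks (idx + 1)

theorem mapGetD (l : List (List Int)) : ∀ (m : Nat), (l.map lastD).getD m 0 = lastD (l.getD m []) := by
  induction l with
  | nil => intro m; simp [lastD, PySem.List.pyGet?, PySem.List.pyIdx?]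
  | cons x xs ih =>
      intro m
      cases m with
      | zero => simp
      | succ m => simpa using ih m

theorem goA_eq_pw (l : List (List Int)) : ∀ (fuel n : Nat) (spl : List Int),
    l.length - 1 - n ≤ fuel →
    goA l fuel n spl = spl ++ pw ((l.map lastD).getD n 0) ((l.map lastD).drop (n+1)) ((n : Int) + 1) := by
  intro fuel
  induction fuel with
  | zero =>
      intro n spl h
      have hlen : (l.map lastD).length ≤ n + 1 := by simp; omega
      simp [goA, List.drop_eq_nil_of_le hlen, pw]
  | succ fuel ih =>
      intro n spl h
      by_cases hn : n < l.length - 1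
      · have hn1 : n + 1 < (l.map lastD).length := by simp; omega
        have hdrop : (l.map lastD).drop (n+1)
            = (l.map lastD).getD (n+1) 0 :: (l.map lastD).drop (n+2) := by
          rw [List.drop_eq_getElem_cons hn1, List.getD_eq_getElem _ _ hn1]
        rw [hdrop]
        by_cases heq : (lastD (l.getD (n+1) []) == lastD (l.getD n [])) = true
        · have heq' : ((l.map lastD).getD (n+1) 0 == (l.map lastD).getD n 0) = true := by
            rw [mapGetD, mapGetD]; exact heq
          have := ih (n+1) spl (by omega)
          simp only [goA, hn, if_pos, heq, pw, heq']
          rw [this]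
          norm_num
        · have heq' : ((l.map lastD).getD (n+1) 0 == (l.map lastD).getD n 0) = false := by
            rw [mapGetD, mapGetD]; simpa using heq
          have := ih (n+1) (spl ++ [((n : Int) + 1)]) (by omega)
          simp only [goA, hn, if_pos, heq, if_false, pw, heq', Bool.false_eq_true]
          rw [this]
          push_cast
          simp [List.append_assoc]
      · have hlen : (l.map lastD).length ≤ n + 1 := by simp; omega
        simp [goA, hn, List.drop_eq_nil_of_le hlen, pw]

theorem sumsB_runs : ∀ (N : Nat) (tl : List Int), tl.length ≤ N → ∀ (p : Int) (j : Nat) (base : Int),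
    sumsB (((rlGo p tl j).1 :: runLengths (rlGo p tl j).2).dropLast) base
      = pw p tl (base + (j : Int)) := by
  intro N
  induction N with
  | zero =>
      intro tl htl p j base
      have : tl = [] := List.eq_nil_of_length_eq_zero (Nat.le_zero.mp htl)
      subst this
      simp [rlGo, runLengths, sumsB, pw]
  | succ N ih =>
      intro tl htl p j base
      cases tl with
      | nil => simp [rlGo, runLengths, sumsB, pw]
      | cons k ks =>
          by_cases hk : (k == p) = true
          · have := ih ks (by simpa using Nat.le_of_succ_le_succ htl) p (j+1) base
            have hkp : k = p := by simpa using hk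
            simp only [rlGo, hk, if_true, pw]
            rw [this, hkp]
            congr 1
            push_cast
            ring
          · simp only [rlGo, hk, Bool.false_eq_true, if_false, pw]
            -- runLengths (k :: ks) is nonempty, so dropLast keeps the head j
            rw [runLengths]
            have hih := ih ks (by simpa using Nat.le_of_succ_le_succ htl) k 1 (base + (j : Int))
            simp only [List.dropLast_cons₂, sumsB]
            rw [hih]
            norm_num

theorem ports_agree (l : List (List Int)) : find_region_split l = find_region_split_alt l := by
  unfold find_region_split find_region_split_alt
  by_cases hsmall : l.length < 2
  · have h0 : l.length - 1 - 0 ≤ l.length := by omega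
    rw [goA_eq_pw l l.length 0 [] h0]
    have : (l.map lastD).length ≤ 1 := by simp; omega
    simp [List.drop_eq_nil_of_le this, pw, hsmall]
  · simp only [hsmall, if_false]
    obtain ⟨k, tl, hkeys⟩ : ∃ k tl, l.map lastD = k :: tl := by
      cases l with
      | nil => simp at hsmall
      | cons a as => exact ⟨lastD a, as.map lastD, rfl⟩
    have h0 : l.length - 1 - 0 ≤ l.length := by omega
    rw [goA_eq_pw l l.length 0 [] h0, hkeys]
    rw [runLengths]
    have := sumsB_runs tl.length tl le_rfl k 1 0
    simp only [List.getD_cons_zero, List.nil_append]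
    rw [this]
    norm_num

-- ===== VERDICT (by name: the statement is the Claim_ definition above) =====
theorem find_region_split_spec : Claim_equal_find_region_split := by
  intro l _ _
  exact ports_agree l
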